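-- pv_equiv track=rewrite | github.com/bmoquist/2013KDDCup | Source Code/duplicateops.py | checknames
-- ===== SOURCE A (Python) =====
-- def checknames(basename,lname):
--     l1 = len(basename)
--     l2 = len(lname)
--     count =0
--     #Basename larger than the list name --> cannot be common extended name
--     if(l1>l2):
--         return False
--
--     #All elements must be the same if the lists are the same size
--     if(l1==l2):
--         for i in basename:
--             for j in lname:
--                 if(len(i)<=len(j)):
--                     if(i==j[0:len(i)]):
--                         count+=1
--                         break
--                     else:
--                         continue
--                 else:
--                     if(i[0:len(j)]==j):
--                         count+=1
--                         break
--                     else: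
--                         continue
--
--     #Lists not the same size: Check is all elements are in the list or if all are in the list plus 1 prefix
--     count=0
--
--     for i in basename:
--         for j in lname:
--             if(len(i)<=len(j)):
--                 if(i==j[0:len(i)]):
--                     count+=1
--                     break
--                 else:
--                     continue
--             else:
--                 if(i[0:len(j)]==j):
--                     count+=1
--                     break
--                 else:
--                     continue
--
--     #All of the base name elements are in the list name
--     if(count==l1):
--         return True
--     else:
--         return False
-- ===== SOURCE B (Python) =====
-- def checknames(basename, lname):
--     # Precompute a set of all prefixes of lname elements (for "i is a prefix of some j")
--     # and the set of lname elements (for "some j is a proper prefix of i"): each basename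
--     # element is then tested against these hash sets instead of rescanning lname.
--     if len(basename) > len(lname):
--         return False
--     prefixes = {j[:k] for j in lname for k in range(len(j) + 1)}
--     full = set(lname)
--     return all(
--         i in prefixes or any(i[:k] in full for k in range(len(i)))
--         for i in basename
--     )
-- ===== Notes on version B (the rewrite author's own statement) =====
-- stated objective: faster
-- what changed: A rescans lname for every basename element with manual prefix slicing (plus a dead duplicate counting loop); B precomputes one hash set of all prefixes of lname elements and one of the lname elements themselves, and answers each basename element by set membership, removing the inner scan over lname.
import Mathlib
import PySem

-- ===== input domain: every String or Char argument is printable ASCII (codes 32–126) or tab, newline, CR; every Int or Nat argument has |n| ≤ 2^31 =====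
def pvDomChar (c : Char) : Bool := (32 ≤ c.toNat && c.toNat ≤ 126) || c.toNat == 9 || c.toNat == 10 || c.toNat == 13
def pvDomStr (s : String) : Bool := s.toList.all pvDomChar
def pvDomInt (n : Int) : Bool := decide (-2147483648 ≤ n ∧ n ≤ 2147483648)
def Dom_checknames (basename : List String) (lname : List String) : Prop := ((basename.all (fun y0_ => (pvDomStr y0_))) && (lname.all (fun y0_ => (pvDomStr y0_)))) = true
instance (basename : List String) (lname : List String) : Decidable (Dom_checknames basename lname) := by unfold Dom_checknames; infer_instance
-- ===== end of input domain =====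

-- B replaces A's inner scan over lname with two precomputed sets (all prefixes of lname
-- elements; the lname elements themselves) queried per basename element, removing the inner scan over lname (objective: faster; measured).

-- ===== PORT A =====
-- inner 'for j in lname: … break' loop of A (both count-incrementing branches return true)
def pvInnerA (i : String) : List String → Bool
  | [] => false
  | j :: rest =>
    if PySem.Str.len i ≤ PySem.Str.len j then
      if i == PySem.Str.slice j (some 0) (some (PySem.Str.len i)) then true
      else pvInnerA i rest
    else
      if PySem.Str.slice i (some 0) (some (PySem.Str.len j)) == j then true
      else pvInnerA i rest

-- the 'for i in basename' counting loop (appears twice in A: dead in the l1==l2 branch, then live)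
def pvCountA (basename : List String) (lname : List String) : Int :=
  basename.foldl (fun count i => if pvInnerA i lname then count + 1 else count) 0

def checknames (basename : List String) (lname : List String) : Bool :=
  let l1 : Int := PySem.List.len basename
  let l2 : Int := PySem.List.len lname
  if l1 > l2 then false
  else
    -- dead first loop: its count is discarded by 'count = 0'
    let _count0 : Int := if l1 = l2 then pvCountA basename lname else 0
    let count : Int := pvCountA basename lname
    decide (count = l1)

-- ===== PORT B =====
-- [j[:k] for k in range(len(j)+1)]
def pvPrefixesB (j : String) : List String :=
  (PySem.List.pyRange 0 (PySem.Str.len j + 1) 1).map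
    (fun k => PySem.Str.slice j none (some k))

def checknames_alt (basename : List String) (lname : List String) : Bool :=
  if PySem.List.len basename > PySem.List.len lname then false
  else
    let prefixes : PySem.Set String := PySem.Set.ofList (lname.flatMap pvPrefixesB)
    let full : PySem.Set String := PySem.Set.ofList lname
    basename.all (fun i =>
      PySem.Set.contains prefixes i ||
      (PySem.List.pyRange 0 (PySem.Str.len i) 1).any
        (fun k => PySem.Set.contains full (PySem.Str.slice i none (some k))))

-- ===== PRECONDITION & SPEC =====
def Spec_checknames (basename : List String) (lname : List String) (out : Bool) : Prop := out = checknames_alt basename lname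
instance (basename : List String) (lname : List String) (out : Bool) : Decidable (Spec_checknames basename lname out) := by unfold Spec_checknames; infer_instance

-- ===== CLAIM (what is proved, stated in full; the proofs are below) =====
def Claim_equal_checknames : Prop := ∀ (basename : List String) (lname : List String), Dom_checknames basename lname → Spec_checknames basename lname (checknames basename lname)

-- ===== LEMMAS AND PROOFS =====

-- A's per-element test, as a Prop on the inputs
theorem pvPrefixTest_iff (i j : String) :
    (i == PySem.Str.slice j (some 0) (some (PySem.Str.len i))) = true ↔ i.toList <+: j.toList := by
  rw [beq_iff_eq, ← String.toList_inj]
  have h : (PySem.Str.slice j (some 0) (some (PySem.Str.len i))).toList = j.toList.take i.toList.length := by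
    simp [pysem]
  rw [h]
  exact (List.prefix_iff_eq_take).symm

theorem pvPrefixTest_iff' (i j : String) :
    (PySem.Str.slice i (some 0) (some (PySem.Str.len j)) == j) = true ↔ j.toList <+: i.toList := by
  rw [beq_iff_eq, eq_comm, ← String.toList_inj]
  have h : (PySem.Str.slice i (some 0) (some (PySem.Str.len j))).toList = i.toList.take j.toList.length := by
    simp [pysem]
  rw [h]
  exact (List.prefix_iff_eq_take).symm

theorem pvInnerA_iff (i : String) (L : List String) :
    pvInnerA i L = true ↔ ∃ j ∈ L, i.toList <+: j.toList ∨ j.toList <+: i.toList := by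
  induction L with
  | nil => simp [pvInnerA]
  | cons j rest ih =>
    have hstep : pvInnerA i (j :: rest) = true ↔
        ((i.toList <+: j.toList ∨ j.toList <+: i.toList) ∨ pvInnerA i rest = true) := by
      simp only [pvInnerA]
      split_ifs with h hb hb
      · simp [(pvPrefixTest_iff i j).mp hb]
      · -- len i ≤ len j, test failed: neither prefix relation can hold
        have hlen : i.toList.length ≤ j.toList.length := by
          have e1 : i.toList.length = i.length := String.length_toList
          have e2 : j.toList.length = j.length := String.length_toList
          rw [PySem.Str.len_eq, PySem.Str.len_eq] at h
          omega
        constructor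
        · intro hr; exact Or.inr hr
        · rintro (hdisj | hr)
          · exfalso
            rcases hdisj with hp | hp
            · exact hb ((pvPrefixTest_iff i j).mpr hp)
            · have : j.toList = i.toList :=
                hp.eq_of_length_le (le_antisymm hp.length_le hlen ▸ le_refl _)
              exact hb ((pvPrefixTest_iff i j).mpr (by rw [this]))
          · exact hr
      · simp [(pvPrefixTest_iff' i j).mp hb]
      · have hlen : j.toList.length < i.toList.length := by
          have e1 : i.toList.length = i.length := String.length_toList
          have e2 : j.toList.length = j.length := String.length_toList
          rw [PySem.Str.len_eq, PySem.Str.len_eq] at h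
          omega
        constructor
        · intro hr; exact Or.inr hr
        · rintro (hdisj | hr)
          · exfalso
            rcases hdisj with hp | hp
            · exact absurd hp.length_le (by omega)
            · exact hb ((pvPrefixTest_iff' i j).mpr hp)
          · exact hr
    rw [hstep, ih]
    simp

-- B's "i in prefixes" disjunct
theorem pvMemPrefixes_iff (i j : String) :
    i ∈ pvPrefixesB j ↔ i.toList <+: j.toList := by
  unfold pvPrefixesB
  rw [PySem.List.pyRange_one]
  simp only [List.map_map, List.mem_map, List.mem_range, Function.comp]
  constructor
  · rintro ⟨k, hk, rfl⟩
    have h : (PySem.Str.slice j none (some ((0:Int) + (k:Int)))).toList = j.toList.take k := by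
      simp [pysem]
    rw [h]
    exact List.take_prefix k j.toList
  · intro hp
    refine ⟨i.toList.length, ?_, ?_⟩
    · have := hp.length_le
      have e1 : i.toList.length = i.length := String.length_toList
      have e2 : j.toList.length = j.length := String.length_toList
      simp only [pysem]
      omega
    · rw [← String.toList_inj]
      have h : (PySem.Str.slice j none (some ((0:Int) + (i.toList.length : Int)))).toList
          = j.toList.take i.toList.length := by simp [pysem]
      rw [h, eq_comm]
      exact List.prefix_iff_eq_take.mp hp

-- B's "some proper prefix of i is in lname" disjunct
theorem pvProperPrefix_iff (i : String) (L : List String) :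
    ((PySem.List.pyRange 0 (PySem.Str.len i) 1).any
        (fun k => PySem.Set.contains (PySem.Set.ofList L) (PySem.Str.slice i none (some k))) = true)
      ↔ ∃ j ∈ L, j.toList <+: i.toList ∧ j.toList.length < i.toList.length := by
  rw [PySem.List.pyRange_one, List.any_map, List.any_eq_true]
  simp only [List.mem_range, Function.comp, PySem.Set.contains_iff, PySem.Set.mem_ofList]
  constructor
  · rintro ⟨k, hk, hmem⟩
    have hkn : k < i.toList.length := by
      have e1 : i.toList.length = i.length := String.length_toList
      simp only [pysem] at hk
      omega
    have h : (PySem.Str.slice i none (some ((0:Int) + (k:Int)))).toList = i.toList.take k := by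
      simp [pysem]
    refine ⟨_, hmem, ?_, ?_⟩
    · rw [h]; exact List.take_prefix k i.toList
    · rw [h, List.length_take]; omega
  · rintro ⟨j, hj, hp, hlt⟩
    refine ⟨j.toList.length, ?_, ?_⟩
    · have e1 : i.toList.length = i.length := String.length_toList
      have e2 : j.toList.length = j.length := String.length_toList
      simp only [pysem]
      omega
    · have h : (PySem.Str.slice i none (some ((0:Int) + (j.toList.length:Int)))).toList
          = i.toList.take j.toList.length := by simp [pysem]
      have : PySem.Str.slice i none (some ((0:Int) + (j.toList.length:Int))) = j := by
        rw [← String.toList_inj, h, eq_comm]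
        exact List.prefix_iff_eq_take.mp hp
      rw [this]; exact hj

-- per-element: A's inner loop equals B's two-set test
theorem pvElem_eq (i : String) (L : List String) :
    pvInnerA i L =
      (PySem.Set.contains (PySem.Set.ofList (L.flatMap pvPrefixesB)) i ||
       (PySem.List.pyRange 0 (PySem.Str.len i) 1).any
         (fun k => PySem.Set.contains (PySem.Set.ofList L) (PySem.Str.slice i none (some k)))) := by
  apply Bool.coe_iff_coe.mp
  rw [Bool.or_eq_true, pvInnerA_iff, pvProperPrefix_iff,
      PySem.Set.contains_iff, PySem.Set.mem_ofList, List.mem_flatMap]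
  constructor
  · rintro ⟨j, hj, hp | hp⟩
    · exact Or.inl ⟨j, hj, (pvMemPrefixes_iff i j).mpr hp⟩
    · by_cases hlt : j.toList.length < i.toList.length
      · exact Or.inr ⟨j, hj, hp, hlt⟩
      · have : j.toList = i.toList := hp.eq_of_length_le (by omega)
        exact Or.inl ⟨j, hj, (pvMemPrefixes_iff i j).mpr (by rw [this])⟩
  · rintro (⟨j, hj, hm⟩ | ⟨j, hj, hp, _⟩)
    · exact ⟨j, hj, Or.inl ((pvMemPrefixes_iff i j).mp hm)⟩
    · exact ⟨j, hj, Or.inr hp⟩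

-- ===== VERDICT (by name: the statement is the Claim_ definition above) =====
theorem checknames_spec : Claim_equal_checknames := by
  intro basename lname _
  unfold Spec_checknames checknames checknames_alt
  simp only []
  by_cases hgt : PySem.List.len basename > PySem.List.len lname
  · rw [if_pos hgt, if_pos hgt]
  · rw [if_neg hgt, if_neg hgt]
    apply Bool.coe_iff_coe.mp
    rw [decide_eq_true_eq, List.all_eq_true]
    unfold pvCountA
    rw [PySem.List.foldl_count_if, zero_add]
    have hlen : PySem.List.len basename = (basename.length : Int) := by simp [pysem]
    rw [hlen]
    have hcast : ((basename.countP (fun i => pvInnerA i lname) : Int) = (basename.length : Int))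
        ↔ basename.countP (fun i => pvInnerA i lname) = basename.length := Nat.cast_inj
    rw [hcast, List.countP_eq_length]
    constructor
    · intro h x hx
      rw [← pvElem_eq]
      exact h x hx
    · intro h x hx
      rw [pvElem_eq]
      exact h x hx
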